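-- pv_equiv track=rewrite | github.com/DaFluffyPotato/fluffy_pavlov_mm | bot_scripts/util.py | grammatical_list
-- ===== SOURCE A (Python) =====
-- def grammatical_list(strings):
--     output = ''
--     for i, string in enumerate(strings):
--         if i != 0:
--             if len(strings) != 2:
--                 output += ','
--             if i == len(strings) - 1:
--                 output += ' and '
--             else:
--                 output += ' '
--         output += string
--     return output
-- ===== SOURCE B (Python) =====
-- def grammatical_list(strings):
--     if len(strings) == 0:
--         return ''
--     if len(strings) == 1:
--         return strings[0]
--     if len(strings) == 2:
--         return strings[0] + ' and ' + strings[1]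
--     return ', '.join(strings[:-1]) + ', and ' + strings[-1]
-- ===== Notes on version B (the rewrite author's own statement) =====
-- stated objective: simpler
-- what changed: Replaced the index-counting loop that hand-builds separators with three early-return guards (empty, single, pair) plus a ', '.join over the prefix followed by ', and ' and the last element; join also avoids quadratic string += concatenation.
import Mathlib
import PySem

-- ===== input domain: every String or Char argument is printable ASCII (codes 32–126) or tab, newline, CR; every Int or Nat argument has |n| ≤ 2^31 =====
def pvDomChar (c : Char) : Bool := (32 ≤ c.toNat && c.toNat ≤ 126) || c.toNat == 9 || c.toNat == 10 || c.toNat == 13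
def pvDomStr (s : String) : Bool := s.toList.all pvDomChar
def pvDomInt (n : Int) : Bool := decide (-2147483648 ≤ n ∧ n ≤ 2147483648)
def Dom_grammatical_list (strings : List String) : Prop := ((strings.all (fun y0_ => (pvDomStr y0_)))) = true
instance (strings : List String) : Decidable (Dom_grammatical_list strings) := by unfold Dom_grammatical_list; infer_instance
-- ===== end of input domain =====

-- B replaces A's index-counting separator loop with guards for the 0/1/2-element cases plus a ', '.join of the prefix and ', and ' before the last element; objective: simpler.


-- ===== PORT A =====
-- loop body of A's 'for i, string in enumerate(strings)' (n = len(strings))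
def gstepA (n : Int) (output : String) (p : Int × String) : String :=
  let output :=
    if p.1 ≠ 0 then
      (if n ≠ 2 then output ++ "," else output) ++ (if p.1 = n - 1 then " and " else " ")
    else output
  output ++ p.2

def grammatical_list (strings : List String) : String :=
  (PySem.List.enumerate strings).foldl (gstepA (strings.length : Int)) ""

-- ===== PORT B =====
def grammatical_list_alt (strings : List String) : String :=
  if strings.length = 0 then ""
  else if strings.length = 1 then (PySem.List.pyGet? strings 0).getD ""
  else if strings.length = 2 then
    (PySem.List.pyGet? strings 0).getD "" ++ " and " ++ (PySem.List.pyGet? strings 1).getD ""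
  else
    PySem.Str.join ", " (PySem.List.slice strings none (some (-1))) ++ ", and " ++
      (PySem.List.pyGet? strings (-1)).getD ""

-- ===== PRECONDITION & SPEC =====
def Spec_grammatical_list (strings : List String) (out : String) : Prop := out = grammatical_list_alt strings
instance (strings : List String) (out : String) : Decidable (Spec_grammatical_list strings out) := by unfold Spec_grammatical_list; infer_instance

-- ===== CLAIM (what is proved, stated in full; the proofs are below) =====
def Claim_equal_grammatical_list : Prop := ∀ (strings : List String), Dom_grammatical_list strings → Spec_grammatical_list strings (grammatical_list strings)

-- ===== LEMMAS AND PROOFS =====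
theorem lit_comma_and : ("," ++ " and " : String) = ", and " := by
  apply String.toList_injective; simp

theorem lit_comma_sp : ("," ++ " " : String) = ", " := by
  apply String.toList_injective; simp

theorem join_singleton_str (x : String) : PySem.Str.join ", " [x] = x := by
  apply String.toList_injective; simp [PySem.Str.join, PySem.Chars.join_singleton]

theorem join_cons_cons_str (x y : String) (l : List String) :
    PySem.Str.join ", " (x :: y :: l) = x ++ ", " ++ PySem.Str.join ", " (y :: l) := by
  apply String.toList_injective
  simp [PySem.Str.join, PySem.Chars.join_cons_cons]

theorem foldl_pull (l : List String) : ∀ (a b : String),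
    l.foldl (fun s y => s ++ ", " ++ y) (a ++ b) = a ++ l.foldl (fun s y => s ++ ", " ++ y) b := by
  induction l with
  | nil => intro a b; rfl
  | cons z l ih =>
      intro a b
      simp only [List.foldl_cons]
      rw [show (a ++ b) ++ ", " ++ z = a ++ (b ++ ", " ++ z) from by
        simp [String.append_assoc], ih]

theorem join_comma_foldl (l : List String) : ∀ (x : String),
    PySem.Str.join ", " (x :: l) = l.foldl (fun s y => s ++ ", " ++ y) x := by
  induction l with
  | nil => intro x; simpa using join_singleton_str x
  | cons y l ih =>
      intro x
      rw [join_cons_cons_str, List.foldl_cons, ih y, foldl_pull]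

theorem foldA_mid (n : Nat) (hn : n ≠ 2) : ∀ (mid : List String) (la acc : String) (k : Nat),
    1 ≤ k → k + mid.length + 1 = n →
    (PySem.List.enumerate (mid ++ [la]) (k : Int)).foldl (gstepA (n : Int)) acc
      = (mid.foldl (fun s y => s ++ ", " ++ y) acc) ++ ", and " ++ la := by
  intro mid
  induction mid with
  | nil =>
      intro la acc k hk hlen
      simp only [List.length_nil] at hlen
      have hkn : (k : Int) = (n : Int) - 1 := by omega
      have hk0 : (k : Int) ≠ 0 := by omega
      have hn' : (n : Int) ≠ 2 := by exact_mod_cast Nat.cast_injective.ne hn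
      simp only [List.nil_append, PySem.List.enumerate_cons, PySem.List.enumerate_nil,
        List.foldl_cons, List.foldl_nil, List.foldl]
      simp only [gstepA, hk0, hkn, hn', if_pos, if_neg, ite_true, ite_false, ne_eq,
        not_true, not_false_iff]
      have h : (acc ++ ",") ++ " and " = acc ++ ", and " := by
        rw [String.append_assoc, lit_comma_and]
      rw [h, if_pos (show ¬((n : Int) - 1 = 0) by omega)]
  | cons x mid ih =>
      intro la acc k hk hlen
      have hk0 : (k : Int) ≠ 0 := by omega
      have hkn : (k : Int) ≠ (n : Int) - 1 := by
        simp only [List.length_cons] at hlen; omega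
      have hn' : (n : Int) ≠ 2 := by exact_mod_cast Nat.cast_injective.ne hn
      simp only [List.cons_append, PySem.List.enumerate_cons, List.foldl_cons]
      have hstep : gstepA (n : Int) acc ((k : Int), x) = acc ++ ", " ++ x := by
        simp only [gstepA, hk0, hkn, hn', ne_eq, not_false_iff, ite_true, ite_false,
          if_pos, if_neg]
        have h : (acc ++ ",") ++ " " = acc ++ ", " := by
          rw [String.append_assoc, lit_comma_sp]
        rw [h]
      rw [hstep]
      have := ih la (acc ++ ", " ++ x) (k + 1) (by omega)
        (by simp only [List.length_cons] at hlen ⊢; omega)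
      simpa using this

theorem A_eq_B_long (s0 la : String) (mid : List String) (hmid : mid ≠ []) :
    grammatical_list (s0 :: (mid ++ [la])) = grammatical_list_alt (s0 :: (mid ++ [la])) := by
  have hlen : (s0 :: (mid ++ [la])).length = mid.length + 2 := by simp
  have hm1 : 1 ≤ mid.length := by
    cases mid with
    | nil => exact absurd rfl hmid
    | cons _ _ => simp
  -- A side
  have hA : grammatical_list (s0 :: (mid ++ [la]))
      = (mid.foldl (fun s y => s ++ ", " ++ y) s0) ++ ", and " ++ la := by
    unfold grammatical_list
    rw [hlen]
    simp only [PySem.List.enumerate_cons, List.foldl_cons]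
    have h0 : gstepA ((mid.length + 2 : Nat) : Int) "" ((0 : Int), s0) = s0 := by
      simp [gstepA]
    rw [h0]
    have := foldA_mid (mid.length + 2) (by omega) mid la s0 1 (by omega) (by omega)
    simpa using this
  -- B side
  have hB : grammatical_list_alt (s0 :: (mid ++ [la]))
      = (mid.foldl (fun s y => s ++ ", " ++ y) s0) ++ ", and " ++ la := by
    unfold grammatical_list_alt
    rw [hlen]
    have h2 : ¬ (mid.length + 2 = 0) := by omega
    have h3 : ¬ (mid.length + 2 = 1) := by omega
    have h4 : ¬ (mid.length + 2 = 2) := by omega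
    simp only [h2, h3, h4, if_neg, ite_false]
    have hslice : PySem.List.slice (s0 :: (mid ++ [la])) none (some (-1)) = s0 :: mid := by
      rw [PySem.List.slice_to_neg_one,
        show s0 :: (mid ++ [la]) = (s0 :: mid) ++ [la] from by simp, List.dropLast_concat]
    have hlast : (PySem.List.pyGet? (s0 :: (mid ++ [la])) (-1)).getD "" = la := by
      simp [PySem.List.pyGet?, PySem.List.pyIdx?]
    rw [hslice, hlast, join_comma_foldl]
  rw [hA, hB]

-- ===== VERDICT (by name: the statement is the Claim_ definition above) =====
theorem grammatical_list_spec : Claim_equal_grammatical_list := by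
  intro strings _
  unfold Spec_grammatical_list
  match strings with
  | [] => rfl
  | [a] =>
      simp [grammatical_list, grammatical_list_alt, gstepA,
        PySem.List.enumerate_cons, PySem.List.enumerate_nil, PySem.List.pyGet?, PySem.List.pyIdx?]
  | [a, b] =>
      simp [grammatical_list, grammatical_list_alt, gstepA,
        PySem.List.enumerate_cons, PySem.List.enumerate_nil, PySem.List.pyGet?, PySem.List.pyIdx?]
  | a :: b :: c :: rest =>
      have hne : (b :: c :: rest) ≠ [] := by simp
      have hsplit : b :: c :: rest = (b :: c :: rest).dropLast ++ [(b :: c :: rest).getLast hne] :=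
        (List.dropLast_append_getLast hne).symm
      have hmid : (b :: c :: rest).dropLast ≠ [] := by
        cases rest with
        | nil => simp
        | cons _ _ => simp
      rw [hsplit]
      exact A_eq_B_long a ((b :: c :: rest).getLast hne) (b :: c :: rest).dropLast hmid
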